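-- pv_equiv track=rewrite | github.com/vladofilipovic/SGI_Python | SoluzioniTemi/2017-18/2018_02/batnav.py | calcolaStatisticheTiri
-- ===== SOURCE A (Python) =====
-- def calcolaStatisticheTiri(tiri, scac):
--     risultato = {}
--     numTiri = 0
--     colpo = 0
--     buca = 0
--     for i in range (len(tiri)):
--         riga = tiri[i][0]
--         colonna = tiri[i][1]
--         if scac[riga][colonna] == 1:
--             colpo = colpo + 1
--         else:
--             buca = buca + 1
--         numTiri = numTiri + 1
--         risultato[numTiri] = (colpo,buca)
--     return risultato
-- ===== SOURCE B (Python) =====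
-- def calcolaStatisticheTiri(tiri, scac):
--     # Divide and conquer: solve each half independently, then merge by
--     # offsetting the right half's shot numbers and counts by the left
--     # half's totals (its last entry).
--     def solve(shots):
--         n = len(shots)
--         if n == 0:
--             return []
--         if n == 1:
--             r, c = shots[0]
--             f = 1 if scac[r][c] == 1 else 0
--             return [(1, (f, 1 - f))]
--         mid = n // 2
--         left = solve(shots[:mid])
--         right = solve(shots[mid:])
--         _, (h0, m0) = left[-1]
--         return left + [(k + mid, (h + h0, m + m0)) for k, (h, m) in right]
--     return dict(solve(tiri))
-- ===== Notes on version B (the rewrite author's own statement) =====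
-- stated objective: alternative
-- what changed: B solves the problem by divide and conquer: it recursively computes the per-shot statistics of each half of the shot list and merges them by offsetting the right half's shot numbers and cumulative counts by the left half's totals, building the dict once at the end, instead of A's single left-to-right loop with two running counters updating the dict in place.
import Mathlib
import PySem

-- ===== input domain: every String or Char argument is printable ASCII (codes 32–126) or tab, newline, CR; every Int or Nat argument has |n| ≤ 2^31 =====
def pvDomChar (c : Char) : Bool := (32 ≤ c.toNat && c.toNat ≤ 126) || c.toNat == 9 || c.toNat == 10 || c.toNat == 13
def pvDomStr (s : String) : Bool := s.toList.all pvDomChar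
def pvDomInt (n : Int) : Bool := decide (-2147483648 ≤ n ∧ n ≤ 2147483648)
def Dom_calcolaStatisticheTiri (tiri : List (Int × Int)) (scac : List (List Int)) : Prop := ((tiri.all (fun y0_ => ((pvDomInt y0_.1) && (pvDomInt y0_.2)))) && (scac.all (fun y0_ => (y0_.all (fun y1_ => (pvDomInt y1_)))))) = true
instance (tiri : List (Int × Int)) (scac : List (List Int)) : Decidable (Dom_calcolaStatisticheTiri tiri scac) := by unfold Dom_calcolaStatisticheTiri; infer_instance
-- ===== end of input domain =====

-- B: divide and conquer — solve each half of the shot list recursively and merge by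
-- offsetting the right half's keys and counts by the left half's totals,
-- instead of A's single left-to-right loop with two running counters.


-- ===== PORT A =====
-- one loop iteration of A: state (risultato, numTiri, colpo, buca), current shot (riga, colonna)
def stepA (scac : List (List Int)) (st : PySem.Dict Int (Int × Int) × Int × Int × Int)
    (rc : Int × Int) : PySem.Dict Int (Int × Int) × Int × Int × Int :=
  let riga := rc.1
  let colonna := rc.2
  let colpo := if PySem.List.pyGetD (PySem.List.pyGetD scac riga []) colonna 0 = 1 then st.2.2.1 + 1 else st.2.2.1
  let buca := if PySem.List.pyGetD (PySem.List.pyGetD scac riga []) colonna 0 = 1 then st.2.2.2 else st.2.2.2 + 1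
  let numTiri := st.2.1 + 1
  (st.1.insert numTiri (colpo, buca), numTiri, colpo, buca)

def calcolaStatisticheTiri (tiri : List (Int × Int)) (scac : List (List Int)) : List (Int × Int × Int) :=
  let fin := (PySem.List.pyRange 0 tiri.length 1).foldl
    (fun st i => stepA scac st (PySem.List.pyGetD tiri i ((0 : Int), (0 : Int))))
    (PySem.Dict.empty, 0, 0, 0)
  fin.1.items

-- ===== PORT B =====
-- f = 1 if scac[r][c] == 1 else 0   (indices in range under Pre_, so pyGetD is exact)
def flagB (scac : List (List Int)) (rc : Int × Int) : Int :=
  if PySem.List.pyGetD (PySem.List.pyGetD scac rc.1 []) rc.2 0 = 1 then 1 else 0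

-- B's inner 'solve': divide and conquer over the shot list
def solveB (scac : List (List Int)) (shots : List (Int × Int)) : List (Int × Int × Int) :=
  if _h0 : shots.length = 0 then []
  else if _h1 : shots.length = 1 then
    let f := flagB scac (shots.headD (0, 0))   -- shots[0]; shots is nonempty here
    [(1, f, 1 - f)]
  else
    let mid := shots.length / 2
    let left := solveB scac (shots.take mid)
    let right := solveB scac (shots.drop mid)
    let last := left.getLastD (0, 0, 0)        -- left[-1]; left is nonempty here
    left ++ right.map (fun p => (p.1 + (mid : Int), p.2.1 + last.2.1, p.2.2 + last.2.2))
termination_by shots.length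
decreasing_by
  · simp only [List.length_take]; omega
  · simp only [List.length_drop]; omega

def calcolaStatisticheTiri_alt (tiri : List (Int × Int)) (scac : List (List Int)) : List (Int × Int × Int) :=
  (PySem.Dict.ofList (solveB scac tiri)).items

-- ===== PRECONDITION & SPEC =====
-- Pre_ excludes exactly the shots whose board indices are out of range, where A raises IndexError.
def Pre_calcolaStatisticheTiri (tiri : List (Int × Int)) (scac : List (List Int)) : Prop :=
  ∀ rc ∈ tiri, ((PySem.List.pyGet? scac rc.1).bind (fun row => PySem.List.pyGet? row rc.2)).isSome = true
instance (tiri : List (Int × Int)) (scac : List (List Int)) : Decidable (Pre_calcolaStatisticheTiri tiri scac) := by unfold Pre_calcolaStatisticheTiri; infer_instance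

def pvWitness_calcolaStatisticheTiri : (List (Int × Int)) × List (List Int) :=
  ([(0, 0), (1, 1), (-1, 0)], [[1, 0], [0, 1]])

def Spec_calcolaStatisticheTiri (tiri : List (Int × Int)) (scac : List (List Int)) (out : List (Int × Int × Int)) : Prop := out = calcolaStatisticheTiri_alt tiri scac
instance (tiri : List (Int × Int)) (scac : List (List Int)) (out : List (Int × Int × Int)) : Decidable (Spec_calcolaStatisticheTiri tiri scac out) := by unfold Spec_calcolaStatisticheTiri; infer_instance

-- ===== CLAIM (what is proved, stated in full; the proofs are below) =====
def Claim_equal_calcolaStatisticheTiri : Prop := ∀ (tiri : List (Int × Int)) (scac : List (List Int)), Dom_calcolaStatisticheTiri tiri scac → Pre_calcolaStatisticheTiri tiri scac → Spec_calcolaStatisticheTiri tiri scac (calcolaStatisticheTiri tiri scac)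

-- ===== LEMMAS AND PROOFS =====

-- canonical per-shot statistics of a flag list, starting at shot number k with h prior hits:
-- entry (k+i, h+hits_i, (k+i)-(h+hits_i)) for each prefix of length i ≥ 1
def specL (fs : List Int) (k h : Int) : List (Int × Int × Int) :=
  match fs with
  | [] => []
  | f :: t => (k + 1, h + f, (k + 1) - (h + f)) :: specL t (k + 1) (h + f)

lemma specL_append (a b : List Int) (k h : Int) :
    specL (a ++ b) k h = specL a k h ++ specL b (k + a.length) (h + a.sum) := by
  induction a generalizing k h with
  | nil => simp [specL]
  | cons f t ih =>
      simp only [List.cons_append, specL, ih, List.length_cons, List.sum_cons, List.cons_append]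
      congr 2 <;> push_cast <;> ring

lemma specL_key_bound (fs : List Int) (k h : Int) (p : Int × Int × Int)
    (hp : p ∈ specL fs k h) : k + 1 ≤ p.1 ∧ p.1 ≤ k + fs.length := by
  induction fs generalizing k h with
  | nil => simp [specL] at hp
  | cons f t ih =>
      simp only [specL, List.mem_cons] at hp
      rcases hp with rfl | hp
      · simp only [List.length_cons]; push_cast; omega
      · have := ih (k + 1) (h + f) hp
        simp only [List.length_cons]
        push_cast
        omega

lemma specL_shift (fs : List Int) (k h d e : Int) :
    specL fs (k + d) (h + e) =
      (specL fs k h).map (fun p => (p.1 + d, p.2.1 + e, p.2.2 + (d - e))) := by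
  induction fs generalizing k h with
  | nil => simp [specL]
  | cons f t ih =>
      simp only [specL, List.map_cons, List.cons.injEq, Prod.mk.injEq]
      refine ⟨⟨by ring, by ring, by ring⟩, ?_⟩
      have h1 : k + d + 1 = (k + 1) + d := by ring
      rw [h1]
      have h2 : h + e + f = (h + f) + e := by ring
      rw [h2, ih]

lemma specL_getLast? (fs : List Int) (hne : fs ≠ []) (k h : Int) :
    (specL fs k h).getLast? = some (k + fs.length, h + fs.sum, (k + fs.length) - (h + fs.sum)) := by
  induction fs using List.reverseRecOn with
  | nil => exact absurd rfl hne
  | append_singleton t x _ =>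
      rw [specL_append, specL, specL, List.getLast?_concat]
      simp only [List.length_append, List.sum_append, List.length_cons, List.length_nil,
        List.sum_cons, List.sum_nil, Option.some.injEq, Prod.mk.injEq]
      refine ⟨by push_cast; ring, by push_cast; ring, by push_cast; ring⟩


lemma specL_keys_nodup (fs : List Int) (k h : Int) :
    ((specL fs k h).map (·.1)).Nodup := by
  induction fs generalizing k h with
  | nil => simp [specL]
  | cons f t ih =>
      simp only [specL, List.map_cons, List.nodup_cons]
      refine ⟨?_, ih (k + 1) (h + f)⟩
      intro hmem
      rcases List.mem_map.1 hmem with ⟨p, hp, hp1⟩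
      have := specL_key_bound t (k + 1) (h + f) p hp
      omega

-- ---- B equals specL ----

lemma solveB_eq (scac : List (List Int)) :
    ∀ n (shots : List (Int × Int)), shots.length = n →
      solveB scac shots = specL (shots.map (flagB scac)) 0 0 := by
  intro n
  induction n using Nat.strong_induction_on with
  | _ n ih =>
    intro shots hlen
    rw [solveB]
    by_cases h0 : shots.length = 0
    · rw [dif_pos h0]
      rw [List.length_eq_zero_iff.1 h0]
      simp [specL]
    · rw [dif_neg h0]
      by_cases h1 : shots.length = 1
      · rw [dif_pos h1]
        rcases shots with _ | ⟨rc, rest⟩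
        · simp at h1
        · have : rest = [] := by simpa using h1
          subst this
          simp [specL]
      · rw [dif_neg h1]
        dsimp only
        have hlen2 : 2 ≤ shots.length := by omega
        have hmidlt : shots.length / 2 < n := by omega
        have hdroplt : shots.length - shots.length / 2 < n := by omega
        rw [ih _ (by rw [List.length_take]; omega) (shots.take (shots.length / 2)) rfl,
            ih _ (by rw [List.length_drop]; omega) (shots.drop (shots.length / 2)) rfl]
        set l := shots.take (shots.length / 2) with hl
        set r := shots.drop (shots.length / 2) with hr
        have hlen_l : l.length = shots.length / 2 := by
          rw [hl, List.length_take]; omega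
        have hlne : l.map (flagB scac) ≠ [] := by
          simp only [ne_eq, List.map_eq_nil_iff]
          intro hnil
          have := congrArg List.length hnil
          simp [hlen_l] at this
          omega
        -- left's last element
        have hlast : (specL (l.map (flagB scac)) 0 0).getLastD (0, 0, 0)
            = (((l.map (flagB scac)).length : Int), (l.map (flagB scac)).sum,
               ((l.map (flagB scac)).length : Int) - (l.map (flagB scac)).sum) := by
          rw [List.getLastD_eq_getLast?, specL_getLast? _ hlne]
          simp
        rw [hlast]
        have hsplit : shots.map (flagB scac) = l.map (flagB scac) ++ r.map (flagB scac) := by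
          rw [← List.map_append, hl, hr, List.take_append_drop]
        rw [hsplit, specL_append]
        congr 1
        rw [show ((0 : Int) + (l.map (flagB scac)).length) = (0 : Int) + ((l.map (flagB scac)).length : Int) from rfl]
        rw [specL_shift (r.map (flagB scac)) 0 0 ((l.map (flagB scac)).length : Int) ((l.map (flagB scac)).sum)]
        simp only [List.length_map, hlen_l]

lemma alt_eq_specL (tiri : List (Int × Int)) (scac : List (List Int)) :
    calcolaStatisticheTiri_alt tiri scac = specL (tiri.map (flagB scac)) 0 0 := by
  unfold calcolaStatisticheTiri_alt PySem.Dict.ofList PySem.Dict.update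
  rw [solveB_eq scac tiri.length tiri rfl]
  rw [PySem.Dict.items_foldl_insert_fresh (specL (tiri.map (flagB scac)) 0 0)
        Prod.fst Prod.snd PySem.Dict.empty (by intro a _; simp)
        (specL_keys_nodup _ 0 0)]
  simp [show (PySem.Dict.empty : PySem.Dict Int (Int × Int)).items = [] from rfl]

-- ---- A equals specL ----

lemma afold_eq (scac : List (List Int)) (tiri : List (Int × Int)) :
    tiri.foldl (stepA scac) (PySem.Dict.empty, 0, 0, 0)
      = (PySem.Dict.mk (specL (tiri.map (flagB scac)) 0 0), (tiri.length : Int),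
          (tiri.map (flagB scac)).sum, (tiri.length : Int) - (tiri.map (flagB scac)).sum) := by
  induction tiri using List.reverseRecOn with
  | nil => rfl
  | append_singleton t x ih =>
    rw [List.foldl_append, ih]
    have hnc : (PySem.Dict.mk (specL (t.map (flagB scac)) 0 0)).contains ((t.length : Int) + 1) = false := by
      rw [PySem.Dict.contains_eq_decide_mem_keys]
      simp only [decide_eq_false_iff_not]
      intro hmem
      have : ((t.length : Int) + 1) ∈ (specL (t.map (flagB scac)) 0 0).map (·.1) := hmem
      rcases List.mem_map.1 this with ⟨p, hp, hp1⟩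
      have := specL_key_bound _ 0 0 p hp
      simp only [List.length_map] at this
      omega
    have hspec : specL ((t ++ [x]).map (flagB scac)) 0 0
        = specL (t.map (flagB scac)) 0 0
          ++ [(((t.length : Int) + 1), (t.map (flagB scac)).sum + flagB scac x,
              ((t.length : Int) + 1) - ((t.map (flagB scac)).sum + flagB scac x))] := by
      rw [List.map_append, specL_append]
      simp [specL, add_comm]
    simp only [List.foldl_cons, List.foldl_nil, stepA]
    simp only [Prod.mk.injEq]
    refine ⟨?_, ?_, ?_, ?_⟩
    · apply PySem.Dict.ext
      rw [PySem.Dict.items_insert_of_not_contains _ _ hnc, hspec]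
      simp only [List.append_cancel_left_eq, List.cons.injEq, and_true, Prod.mk.injEq]
      simp only [flagB]
      split_ifs with h <;> simp only [true_and] <;> omega
    · push_cast [List.length_append, List.length_singleton]; ring
    · simp only [List.map_append, List.sum_append, List.map_singleton, List.sum_cons,
        List.sum_nil, flagB]
      split_ifs with h <;> push_cast [List.length_append, List.length_singleton] <;> omega
    · simp only [List.map_append, List.sum_append, List.map_singleton, List.sum_cons,
        List.sum_nil, flagB]
      split_ifs with h <;> push_cast [List.length_append, List.length_singleton] <;> omega

lemma a_eq_fold (tiri : List (Int × Int)) (scac : List (List Int)) :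
    calcolaStatisticheTiri tiri scac
      = (tiri.foldl (stepA scac) (PySem.Dict.empty, 0, 0, 0)).1.items := by
  unfold calcolaStatisticheTiri
  simp only [PySem.List.foldl_pyRange_zero_pyGetD' tiri ((0 : Int), (0 : Int)) (stepA scac)
        (PySem.Dict.empty, 0, 0, 0)]

-- ===== VERDICT (by name: the statement is the Claim_ definition above) =====
theorem calcolaStatisticheTiri_spec : Claim_equal_calcolaStatisticheTiri := by
  intro tiri scac _ _
  unfold Spec_calcolaStatisticheTiri
  rw [a_eq_fold, afold_eq, alt_eq_specL]
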